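-- pv_equiv track=rewrite | github.com/rafaelvlt/python-notes | university-ip-25.1/pset-4-functions/q4.py | calcular_poder
-- ===== SOURCE A (Python) =====
-- def calcular_poder(nome):
--     """calcula poder baseado no nome, retorna poder(int)"""
--     poder = 2000
--     if len(nome) == 4:
--         return poder
--     else:
--         for qtd in range(4, len(nome)):
--             if qtd < 8:
--                 poder += 250
--         else:
--             return poder
-- ===== SOURCE B (Python) =====
-- def calcular_poder(nome):
--     """calcula poder baseado no nome, retorna poder(int)"""
--     return 2000 + 250 * max(0, min(len(nome), 8) - 4)
-- ===== Notes on version B (the rewrite author's own statement) =====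
-- stated objective: simpler
-- what changed: Replaces the for-loop over range(4, len(nome)) with a single closed-form arithmetic expression 2000 + 250 * max(0, min(len(nome), 8) - 4).
import Mathlib
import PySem

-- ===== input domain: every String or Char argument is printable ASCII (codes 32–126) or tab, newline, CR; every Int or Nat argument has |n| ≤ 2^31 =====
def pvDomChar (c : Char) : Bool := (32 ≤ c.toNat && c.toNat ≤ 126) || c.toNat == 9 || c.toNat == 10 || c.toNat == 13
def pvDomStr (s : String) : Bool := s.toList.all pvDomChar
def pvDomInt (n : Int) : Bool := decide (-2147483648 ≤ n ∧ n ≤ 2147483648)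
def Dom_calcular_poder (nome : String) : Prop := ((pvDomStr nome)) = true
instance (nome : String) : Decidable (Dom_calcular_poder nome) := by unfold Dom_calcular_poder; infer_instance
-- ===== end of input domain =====

-- B replaces A's loop over range(4, len(nome)) with a closed-form arithmetic expression (simpler).

-- ===== PORT A =====
def calcular_poder (nome : String) : Int :=
  let poder : Int := 2000
  if PySem.Str.len nome = 4 then poder
  else
    (PySem.List.pyRange 4 (PySem.Str.len nome) 1).foldl
      (fun poder qtd => if qtd < 8 then poder + 250 else poder) poder

-- ===== PORT B =====
def calcular_poder_alt (nome : String) : Int :=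
  2000 + 250 * max 0 (min (PySem.Str.len nome) 8 - 4)

-- ===== PRECONDITION & SPEC =====
def Spec_calcular_poder (nome : String) (out : Int) : Prop := out = calcular_poder_alt nome
instance (nome : String) (out : Int) : Decidable (Spec_calcular_poder nome out) := by unfold Spec_calcular_poder; infer_instance

-- ===== CLAIM (what is proved, stated in full; the proofs are below) =====
def Claim_equal_calcular_poder : Prop := ∀ (nome : String), Dom_calcular_poder nome → Spec_calcular_poder nome (calcular_poder nome)

-- ===== LEMMAS AND PROOFS =====

theorem pv_fold_range (m : Nat) (init : Int) :
    (List.range m).foldl (fun (x : Int) (y : Nat) => if (4:Int) + y < 8 then x + 250 else x) init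
      = init + 250 * min (m : Int) 4 := by
  induction m generalizing init with
  | zero => simp
  | succ m ih =>
    rw [List.range_succ, List.foldl_append, ih]
    simp only [List.foldl_cons, List.foldl_nil]
    by_cases h : (4 : Int) + (m : Int) < 8
    · rw [if_pos h]; omega
    · rw [if_neg h]; omega

theorem pv_loop_closed (n : Int) :
    (PySem.List.pyRange 4 n 1).foldl (fun p q => if q < 8 then p + 250 else p) 2000
      = 2000 + 250 * max 0 (min n 8 - 4) := by
  rw [PySem.List.pyRange_one, List.foldl_map]
  rw [pv_fold_range (n - 4).toNat 2000]
  omega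

-- ===== VERDICT (by name: the statement is the Claim_ definition above) =====
theorem calcular_poder_spec : Claim_equal_calcular_poder := by
  intro nome _
  unfold Spec_calcular_poder calcular_poder calcular_poder_alt PySem.Str.len
  split_ifs with h
  · rw [h]; norm_num
  · exact pv_loop_closed _
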